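-- pv_equiv track=rewrite | github.com/bcgsc/ntLink | bin/ntlink_pair.py | break_alignment_blocks
-- ===== SOURCE A (Python) =====
-- def break_alignment_blocks(sorted_ctg_pos, breaks, filters):
--     "Break the alignment blocks at detected locations"
--     return_alignment_blocks = []
--     current_alignment_block = []
--     for i, mapping in enumerate(sorted_ctg_pos):
--         if i in filters:
--             continue
--         if i in breaks:
--             return_alignment_blocks.append(current_alignment_block)
--             current_alignment_block = [mapping]
--         else:
--             current_alignment_block.append(mapping)
--     if current_alignment_block:
--         return_alignment_blocks.append(current_alignment_block)
--
--     return return_alignment_blocks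
-- ===== SOURCE B (Python) =====
-- def break_alignment_blocks(sorted_ctg_pos, breaks, filters):
--     "Break the alignment blocks at detected locations"
--     n = len(sorted_ctg_pos)
--     effective_breaks = [i for i in range(n) if i in breaks and i not in filters]
--     boundaries = [0] + effective_breaks + [n]
--     segments = [[sorted_ctg_pos[j] for j in range(lo, hi) if j not in filters]
--                 for lo, hi in zip(boundaries, boundaries[1:])]
--     blocks = segments[:-1]
--     if segments[-1]:
--         blocks.append(segments[-1])
--     return blocks
-- ===== Notes on version B (the rewrite author's own statement) =====
-- stated objective: alternative
-- what changed: B replaces A's per-element accumulator loop with a table-first pass: it lists the effective break boundaries once, slices the index range into per-boundary segments (filtering inside each), and assembles all-but-last segments plus a non-empty last segment.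
import Mathlib
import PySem

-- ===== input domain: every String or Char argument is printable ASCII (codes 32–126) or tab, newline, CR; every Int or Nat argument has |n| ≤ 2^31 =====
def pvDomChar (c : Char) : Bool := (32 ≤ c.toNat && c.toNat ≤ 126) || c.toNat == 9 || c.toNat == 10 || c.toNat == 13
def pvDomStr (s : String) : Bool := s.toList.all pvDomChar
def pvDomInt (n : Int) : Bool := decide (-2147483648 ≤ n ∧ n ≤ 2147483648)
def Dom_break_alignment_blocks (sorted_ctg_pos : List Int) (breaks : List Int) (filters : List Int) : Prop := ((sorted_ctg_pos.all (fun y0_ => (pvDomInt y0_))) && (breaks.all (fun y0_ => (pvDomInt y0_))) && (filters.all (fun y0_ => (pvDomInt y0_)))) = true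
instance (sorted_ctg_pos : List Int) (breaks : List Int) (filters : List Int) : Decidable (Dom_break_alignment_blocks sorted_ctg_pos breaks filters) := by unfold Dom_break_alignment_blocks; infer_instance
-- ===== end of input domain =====

-- B rebuilds the result table-first: it lists the effective break boundaries once,
-- slices the input into per-boundary segments, and assembles them — same values,
-- a different (nested per-segment) decomposition instead of A's per-element accumulator.

-- ===== PORT A =====
def break_alignment_blocks (sorted_ctg_pos : List Int) (breaks : List Int) (filters : List Int) : List (List Int) :=
  let st := (PySem.List.enumerate sorted_ctg_pos).foldl
    (fun (st : List (List Int) × List Int) (p : Int × Int) =>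
      if filters.contains p.1 then st
      else if breaks.contains p.1 then (st.1 ++ [st.2], [p.2])
      else (st.1, st.2 ++ [p.2])) ([], [])
  if st.2 = [] then st.1 else st.1 ++ [st.2]

-- ===== PORT B =====
-- sorted_ctg_pos[j]: j is always in range here, so pyGetD's default 0 is never used
def break_alignment_blocks_alt (sorted_ctg_pos : List Int) (breaks : List Int) (filters : List Int) : List (List Int) :=
  let n : Int := PySem.List.len sorted_ctg_pos
  let effective_breaks := (PySem.List.pyRange 0 n 1).filter
    (fun i => breaks.contains i && !filters.contains i)
  let boundaries := [0] ++ effective_breaks ++ [n]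
  let segments := (boundaries.zip boundaries.tail).map (fun (p : Int × Int) =>
    ((PySem.List.pyRange p.1 p.2 1).filter (fun j => !filters.contains j)).map
      (fun j => PySem.List.pyGetD sorted_ctg_pos j 0))
  let blocks := segments.dropLast
  if (segments.getLast?.getD []) = [] then blocks else blocks ++ [segments.getLast?.getD []]

-- ===== PRECONDITION & SPEC =====
def Spec_break_alignment_blocks (sorted_ctg_pos : List Int) (breaks : List Int) (filters : List Int) (out : List (List Int)) : Prop := out = break_alignment_blocks_alt sorted_ctg_pos breaks filters
instance (sorted_ctg_pos : List Int) (breaks : List Int) (filters : List Int) (out : List (List Int)) : Decidable (Spec_break_alignment_blocks sorted_ctg_pos breaks filters out) := by unfold Spec_break_alignment_blocks; infer_instance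

-- ===== CLAIM (what is proved, stated in full; the proofs are below) =====
def Claim_equal_break_alignment_blocks : Prop := ∀ (sorted_ctg_pos : List Int) (breaks : List Int) (filters : List Int), Dom_break_alignment_blocks sorted_ctg_pos breaks filters → Spec_break_alignment_blocks sorted_ctg_pos breaks filters (break_alignment_blocks sorted_ctg_pos breaks filters)

-- ===== LEMMAS AND PROOFS =====

-- one segment of B: the kept elements with indices in [lo, hi)
def pvSeg (s f : List Int) (lo hi : Int) : List Int :=
  ((PySem.List.pyRange lo hi 1).filter (fun j => !f.contains j)).map
    (fun j => PySem.List.pyGetD s j 0)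

-- assemble the segments between boundaries lo :: eb, final segment ending at hi,
-- returning (all segments but the last, the last segment)
def pvAsm (s f : List Int) (hi : Int) : Int → List Int → List (List Int) × List Int
  | lo, [] => ([], pvSeg s f lo hi)
  | lo, c :: rest => ((pvSeg s f lo c) :: (pvAsm s f hi c rest).1, (pvAsm s f hi c rest).2)

-- A's loop state after the first m indices
def pvStA (s b f : List Int) (m : Nat) : List (List Int) × List Int :=
  (PySem.List.pyRange 0 (m : Int) 1).foldl
    (fun (st : List (List Int) × List Int) (j : Int) =>
      if f.contains j then st
      else if b.contains j then (st.1 ++ [st.2], [PySem.List.pyGetD s j 0])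
      else (st.1, st.2 ++ [PySem.List.pyGetD s j 0])) ([], [])

-- B's effective breaks among the first m indices
def pvEB (b f : List Int) (m : Nat) : List Int :=
  (PySem.List.pyRange 0 (m : Int) 1).filter (fun i => b.contains i && !f.contains i)

theorem pvSeg_succ (s f : List Int) (lo m : Int) (h : lo ≤ m) :
    pvSeg s f lo (m + 1) =
      pvSeg s f lo m ++ (if f.contains m then [] else [PySem.List.pyGetD s m 0]) := by
  unfold pvSeg
  rw [PySem.List.pyRange_one_succ_right h, List.filter_append, List.map_append]
  by_cases hf : m ∈ f <;> simp [hf]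

theorem pvSeg_single (s f : List Int) (m : Int) :
    pvSeg s f m (m + 1) = (if f.contains m then [] else [PySem.List.pyGetD s m 0]) := by
  unfold pvSeg
  rw [PySem.List.pyRange_one_singleton]
  by_cases hf : m ∈ f <;> simp [hf]

theorem pvAsm_ext (s f : List Int) (m : Int) :
    ∀ (eb : List Int) (lo : Int), (∀ c ∈ eb, c ≤ m) → lo ≤ m →
    pvAsm s f (m + 1) lo eb =
      ((pvAsm s f m lo eb).1,
       (pvAsm s f m lo eb).2 ++ (if f.contains m then [] else [PySem.List.pyGetD s m 0])) := by
  intro eb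
  induction eb with
  | nil => intro lo _ hlo; simp [pvAsm, pvSeg_succ s f lo m hlo]
  | cons c rest ih =>
      intro lo hc hlo
      have hcm : c ≤ m := hc c (by simp)
      have := ih c (fun x hx => hc x (by simp [hx])) hcm
      simp [pvAsm, this]

theorem pvAsm_app (s f : List Int) (hi t : Int) :
    ∀ (eb : List Int) (lo : Int),
    pvAsm s f hi lo (eb ++ [t]) =
      ((pvAsm s f t lo eb).1 ++ [(pvAsm s f t lo eb).2], pvSeg s f t hi) := by
  intro eb
  induction eb with
  | nil => intro lo; simp [pvAsm]
  | cons c rest ih => intro lo; simp [pvAsm, ih c]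

theorem pvEB_succ (b f : List Int) (m : Nat) :
    pvEB b f (m + 1) =
      pvEB b f m ++ (if b.contains (m : Int) && !f.contains (m : Int) then [(m : Int)] else []) := by
  unfold pvEB
  have h1 : ((m + 1 : Nat) : Int) = (m : Int) + 1 := by push_cast; ring
  rw [h1, PySem.List.pyRange_one_succ_right (Int.natCast_nonneg m), List.filter_append]
  by_cases hb : (m : Int) ∈ b <;> by_cases hf : (m : Int) ∈ f <;> simp [hb, hf]

theorem pvEB_mem (b f : List Int) (m : Nat) : ∀ c ∈ pvEB b f m, c ≤ (m : Int) := by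
  intro c hc
  unfold pvEB at hc
  have h1 := (List.mem_filter.mp hc).1
  have h2 := (PySem.List.mem_pyRange_one.mp h1).2
  omega

theorem pvStA_eq_pvAsm (s b f : List Int) (m : Nat) :
    pvStA s b f m = pvAsm s f (m : Int) 0 (pvEB b f m) := by
  induction m with
  | zero => simp [pvStA, pvEB, pvAsm, pvSeg, PySem.List.pyRange_one_eq_nil (le_refl (0 : Int))]
  | succ m ih =>
      have hcast : ((m + 1 : Nat) : Int) = (m : Int) + 1 := by push_cast; ring
      have hstep : pvStA s b f (m + 1) =
          (fun (st : List (List Int) × List Int) (j : Int) =>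
            if f.contains j then st
            else if b.contains j then (st.1 ++ [st.2], [PySem.List.pyGetD s j 0])
            else (st.1, st.2 ++ [PySem.List.pyGetD s j 0])) (pvStA s b f m) (m : Int) := by
        unfold pvStA
        rw [hcast, PySem.List.pyRange_one_succ_right (Int.natCast_nonneg m), List.foldl_append]
        simp
      rw [hstep, hcast, ih]
      by_cases hf : (m : Int) ∈ f
      · have he : pvEB b f (m + 1) = pvEB b f m := by rw [pvEB_succ]; simp [hf]
        rw [he, pvAsm_ext s f (m : Int) (pvEB b f m) 0 (pvEB_mem b f m) (Int.natCast_nonneg m)]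
        simp [hf]
      · by_cases hb : (m : Int) ∈ b
        · have he : pvEB b f (m + 1) = pvEB b f m ++ [(m : Int)] := by
            rw [pvEB_succ]; simp [hf, hb]
          rw [he, pvAsm_app s f ((m : Int) + 1) (m : Int) (pvEB b f m) 0, pvSeg_single]
          simp [hf, hb]
        · have he : pvEB b f (m + 1) = pvEB b f m := by rw [pvEB_succ]; simp [hb]
          rw [he, pvAsm_ext s f (m : Int) (pvEB b f m) 0 (pvEB_mem b f m) (Int.natCast_nonneg m)]
          simp [hf, hb]

theorem pvZip_eq_pvAsm (s f : List Int) (hi : Int) :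
    ∀ (eb : List Int) (lo : Int),
    (((lo :: (eb ++ [hi])).zip (eb ++ [hi])).map (fun (p : Int × Int) => pvSeg s f p.1 p.2)) =
      (pvAsm s f hi lo eb).1 ++ [(pvAsm s f hi lo eb).2] := by
  intro eb
  induction eb with
  | nil => intro lo; simp [pvAsm]
  | cons c rest ih =>
      intro lo
      simp only [List.cons_append, List.zip_cons_cons, List.map_cons, pvAsm]
      rw [ih c]

-- ===== VERDICT (by name: the statement is the Claim_ definition above) =====
theorem break_alignment_blocks_spec : Claim_equal_break_alignment_blocks := by
  intro s b f _
  unfold Spec_break_alignment_blocks break_alignment_blocks break_alignment_blocks_alt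
  have hA : (PySem.List.enumerate s).foldl
      (fun (st : List (List Int) × List Int) (p : Int × Int) =>
        if f.contains p.1 then st
        else if b.contains p.1 then (st.1 ++ [st.2], [p.2])
        else (st.1, st.2 ++ [p.2])) ([], []) = pvStA s b f s.length := by
    rw [PySem.List.enumerate_eq_map_pyRange s 0, List.foldl_map]
    unfold pvStA
    rw [PySem.List.len_eq]
  have hseg : ((([(0:Int)] ++ pvEB b f s.length ++ [(s.length : Int)]).zip
        (([(0:Int)] ++ pvEB b f s.length ++ [(s.length : Int)]).tail)).map
        (fun (p : Int × Int) =>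
          ((PySem.List.pyRange p.1 p.2 1).filter (fun j => !f.contains j)).map
            (fun j => PySem.List.pyGetD s j 0))) =
      (pvAsm s f (s.length : Int) 0 (pvEB b f s.length)).1 ++
        [(pvAsm s f (s.length : Int) 0 (pvEB b f s.length)).2] := by
    have h := pvZip_eq_pvAsm s f (s.length : Int) (pvEB b f s.length) 0
    simpa [pvSeg] using h
  simp only [PySem.List.len_eq]
  rw [hA, pvStA_eq_pvAsm]
  rw [show ((PySem.List.pyRange 0 (s.length : Int) 1).filter
      (fun i => b.contains i && !f.contains i)) = pvEB b f s.length from rfl]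
  rw [hseg]
  rw [List.dropLast_concat, List.getLast?_concat]
  rcases h2 : (pvAsm s f (s.length : Int) 0 (pvEB b f s.length)).2 with _ | _ <;> simp
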